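-- pv_equiv track=rewrite | github.com/shaneholloman/hegelion | hegelion-data/scripts/format_manual_dialectic.py | _extract_contradictions
-- ===== SOURCE A (Python) =====
-- from typing import List, Dict
--
-- def _extract_contradictions(text: str) -> List[Dict[str, str]]:
--     results: List[Dict[str, str]] = []
--     current: Dict[str, str] | None = None
--     for raw in text.splitlines():
--         line = raw.strip()
--         upper = line.upper()
--         if upper.startswith("CONTRADICTION:"):
--             current = {
--                 "description": line.split(":", 1)[1].strip(),
--                 "evidence": "",
--             }
--             results.append(current)
--         elif upper.startswith("EVIDENCE:") and current:
--             current["evidence"] = line.split(":", 1)[1].strip()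
--     return [c for c in results if c.get("description")]
-- ===== SOURCE B (Python) =====
-- from typing import List, Dict
--
-- def _extract_contradictions(text: str) -> List[Dict[str, str]]:
--     # Single reverse pass: walk the lines bottom-up, remembering the nearest
--     # evidence value not yet claimed by a header (= the LAST evidence of its
--     # block top-down); emit a finished block at each CONTRADICTION header.
--     results: List[Dict[str, str]] = []
--     pending: str | None = None
--     for raw in reversed(text.splitlines()):
--         line = raw.strip()
--         upper = line.upper()
--         if upper.startswith("CONTRADICTION:"):
--             desc = line.split(":", 1)[1].strip()
--             if desc:
--                 results.insert(0, {
--                     "description": desc,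
--                     "evidence": "" if pending is None else pending,
--                 })
--             pending = None
--         elif upper.startswith("EVIDENCE:") and pending is None:
--             pending = line.split(":", 1)[1].strip()
--     return results
-- ===== Notes on version B (the rewrite author's own statement) =====
-- stated objective: alternative
-- what changed: Replaces the forward state machine that appends a mutable in-progress dict and patches its evidence field in place (plus a final filter pass) with a single bottom-up pass over reversed lines that carries the pending last-evidence-of-block value and emits each finished, already-filtered block at its header.
import Mathlib
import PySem

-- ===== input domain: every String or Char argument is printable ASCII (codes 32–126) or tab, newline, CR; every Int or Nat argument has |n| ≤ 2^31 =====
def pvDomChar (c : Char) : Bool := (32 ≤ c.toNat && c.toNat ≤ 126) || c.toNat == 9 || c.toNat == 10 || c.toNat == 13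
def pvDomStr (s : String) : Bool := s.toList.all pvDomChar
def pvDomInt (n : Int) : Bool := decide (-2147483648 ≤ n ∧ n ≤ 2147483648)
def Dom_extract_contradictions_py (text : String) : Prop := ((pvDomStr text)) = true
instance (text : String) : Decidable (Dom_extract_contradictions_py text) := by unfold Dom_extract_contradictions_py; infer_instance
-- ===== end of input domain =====

-- B walks the lines in reverse carrying the pending evidence value, instead of A's forward
-- state machine with a mutable current dict and a final filter pass (objective: alternative).

-- line.split(":", 1)[1].strip() — both Pythons contain this exact expression; the [1] index is
-- only reached behind a startswith guard that guarantees a ':' in line, so the '' default of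
-- getD is unreachable there.
def pvAfterColon (line : String) : String :=
  PySem.Str.strip (((PySem.Str.splitMax? line ":" 1).getD []).getD 1 "")

-- ===== PORT A =====
-- The dict literal {"description": d, "evidence": ""} has two fixed keys; it is carried as the
-- pair (d, "") during the loop and rendered as its assoc list at the end. The Python mutation
-- current["evidence"] = … overwrites the LAST appended entry (current always aliases it), ported
-- as pvSetLastEv; hasCur : Bool renders 'current is not None' ('and current': the dict is
-- non-empty, hence truthy, whenever current is not None).
def pvSetLastEv : List (String × String) → String → List (String × String)
  | [], _ => []
  | [c], e => [(c.1, e)]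
  | c :: cs, e => c :: pvSetLastEv cs e

def pvA_step (s : List (String × String) × Bool) (raw : String) :
    List (String × String) × Bool :=
  let line := PySem.Str.strip raw
  let upper := PySem.Str.upper line
  if PySem.Str.startswith upper "CONTRADICTION:" then
    (s.1 ++ [(pvAfterColon line, "")], true)
  else if PySem.Str.startswith upper "EVIDENCE:" && s.2 then
    (pvSetLastEv s.1 (pvAfterColon line), s.2)
  else s

def extract_contradictions_py (text : String) : List (List (String × String)) :=
  let final := (PySem.Str.splitlines text).foldl pvA_step ([], false)
  (final.1.filter (fun c => c.1 != "")).map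
    (fun c => [("description", c.1), ("evidence", c.2)])

-- ===== PORT B =====
-- 'for raw in reversed(lines)' is the right recursion below: pvB_go handles the rest of the
-- list (= the lines BELOW raw) first, then processes raw with the resulting state; 'results'
-- is built front-first via insert(0, …), 'pending' is the Option in the state.
def pvB_go : List String → List (List (String × String)) × Option String
  | [] => ([], none)
  | raw :: rest =>
    let s := pvB_go rest
    let line := PySem.Str.strip raw
    let upper := PySem.Str.upper line
    if PySem.Str.startswith upper "CONTRADICTION:" then
      let desc := pvAfterColon line
      (if desc != "" then
        [("description", desc), ("evidence", (s.2).getD "")] :: s.1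
       else s.1, none)
    else if PySem.Str.startswith upper "EVIDENCE:" && (s.2).isNone then
      (s.1, some (pvAfterColon line))
    else s

def extract_contradictions_py_alt (text : String) : List (List (String × String)) :=
  (pvB_go (PySem.Str.splitlines text)).1

-- ===== PRECONDITION & SPEC =====
def Spec_extract_contradictions_py (text : String) (out : List (List (String × String))) : Prop := out = extract_contradictions_py_alt text
instance (text : String) (out : List (List (String × String))) : Decidable (Spec_extract_contradictions_py text out) := by unfold Spec_extract_contradictions_py; infer_instance

-- ===== CLAIM (what is proved, stated in full; the proofs are below) =====
def Claim_equal_extract_contradictions_py : Prop := ∀ (text : String), Dom_extract_contradictions_py text → Spec_extract_contradictions_py text (extract_contradictions_py text)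

-- ===== LEMMAS AND PROOFS =====

-- render A's filtered accumulator as the list of output dicts
def pvRender (acc : List (String × String)) : List (List (String × String)) :=
  (acc.filter (fun c => c.1 != "")).map (fun c => [("description", c.1), ("evidence", c.2)])

def pvSetLastOpt (acc : List (String × String)) : Option String → List (String × String)
  | none => acc
  | some e => pvSetLastEv acc e

theorem pvSetLastEv_append : ∀ (acc : List (String × String)) (x : String × String) (e : String),
    pvSetLastEv (acc ++ [x]) e = acc ++ [(x.1, e)]
  | [], _, _ => rfl
  | [_], _, _ => rfl
  | c :: d :: ds, x, e => by
    simpa [pvSetLastEv] using pvSetLastEv_append (d :: ds) x e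

theorem pvSetLastEv_ne_nil (c : String × String) (cs : List (String × String)) (e : String) :
    pvSetLastEv (c :: cs) e ≠ [] := by
  cases cs <;> simp [pvSetLastEv]

theorem pvSetLastEv_setLastEv : ∀ (acc : List (String × String)) (e e' : String),
    pvSetLastEv (pvSetLastEv acc e) e' = pvSetLastEv acc e'
  | [], _, _ => rfl
  | [_], _, _ => rfl
  | c :: d :: ds, e, e' => by
    rcases hx : pvSetLastEv (d :: ds) e with _ | ⟨y, ys⟩
    · exact absurd hx (pvSetLastEv_ne_nil d ds e)
    · have h := pvSetLastEv_setLastEv (d :: ds) e e'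
      rw [hx] at h
      show pvSetLastEv (c :: pvSetLastEv (d :: ds) e) e' = c :: pvSetLastEv (d :: ds) e'
      rw [hx]
      simpa [pvSetLastEv] using h

theorem pvRender_append_single (acc : List (String × String)) (x : String × String) :
    pvRender (acc ++ [x]) =
      pvRender acc ++ (if x.1 != "" then [[("description", x.1), ("evidence", x.2)]] else []) := by
  by_cases h : x.1 != "" <;> simp [pvRender, List.filter_append, h]

-- main invariant: running A's loop from state (acc, b) over ls, then filtering+rendering,
-- yields the rendered acc — with its last evidence patched by B's pending value when b —
-- followed by B's blocks for ls.
theorem pvMain (ls : List String) (acc : List (String × String)) (b : Bool) :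
    pvRender ((ls.foldl pvA_step (acc, b)).1) =
      pvRender (if b then pvSetLastOpt acc (pvB_go ls).2 else acc) ++ (pvB_go ls).1 := by
  induction ls generalizing acc b with
  | nil => cases b <;> simp [pvB_go, pvSetLastOpt]
  | cons raw rest ih =>
    simp only [List.foldl_cons, pvA_step, pvB_go]
    cases hC : PySem.Str.startswith (PySem.Str.upper (PySem.Str.strip raw)) "CONTRADICTION:" with
    | true =>
      -- header line: A appends (desc, ""), B emits the block (if desc nonempty) and resets pending
      simp only [if_true]
      rw [ih]
      cases hp : (pvB_go rest).2 with
      | none =>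
        cases hd : pvAfterColon (PySem.Str.strip raw) != "" <;> cases b <;>
          simp [pvSetLastOpt, hd, pvRender_append_single, List.append_assoc]
      | some p =>
        cases hd : pvAfterColon (PySem.Str.strip raw) != "" <;> cases b <;>
          simp [pvSetLastOpt, hd, hp, pvSetLastEv_append, pvRender_append_single,
            List.append_assoc]
    | false =>
      simp only [Bool.false_eq_true, if_false]
      cases hE : PySem.Str.startswith (PySem.Str.upper (PySem.Str.strip raw)) "EVIDENCE:" with
      | true =>
        simp only [Bool.true_and]
        cases b with
        | false =>
          simp only [Bool.false_eq_true, if_false]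
          rw [ih]
          cases hp : (pvB_go rest).2 with
          | none => simp
          | some p => simp
        | true =>
          -- evidence with a current block: A patches acc's last entry; on B's side it only
          -- matters when no later (lower) evidence already claimed the block
          simp only [if_true]
          rw [ih]
          cases hp : (pvB_go rest).2 with
          | none => simp [pvSetLastOpt]
          | some p => simp [pvSetLastOpt, hp, pvSetLastEv_setLastEv]
      | false =>
        simp only [Bool.false_eq_true, if_false, Bool.false_and]
        exact ih acc b

-- ===== VERDICT (by name: the statement is the Claim_ definition above) =====
theorem extract_contradictions_py_spec : Claim_equal_extract_contradictions_py := by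
  intro text _
  show _ = _
  unfold extract_contradictions_py extract_contradictions_py_alt
  simpa [pvRender] using pvMain (PySem.Str.splitlines text) [] false
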